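-- pv_equiv track=rewrite | github.com/icrphysics/RSStaticCodeChecker | RSStaticCodeChecker/static_code_checker/generated/argument_change_1206.py | argumentsRight
-- ===== SOURCE A (Python) =====
-- def argumentsRight(d):
--     args = ["ApplicatorName","Energy","InsertName","IsAddCutoutChecked","IsocenterData","Name","Description","GantryAngle","CouchAngle","CollimatorAngle"]
--     too_many = []
--     for keyword in d.get("keywords", []):
--         if keyword.get("arg") in args:
--             args.remove(keyword.get("arg"))
--         else:
--             too_many.append(keyword.get("arg"))
--     if not too_many and not args:
--         return True
--     return (0 if too_many else 3)
-- ===== SOURCE B (Python) =====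
-- REQUIRED = ["ApplicatorName", "Energy", "InsertName", "IsAddCutoutChecked",
--             "IsocenterData", "Name", "Description", "GantryAngle",
--             "CouchAngle", "CollimatorAngle"]
--
--
-- def argumentsRight(d):
--     provided = [kw.get("arg") for kw in d.get("keywords", [])]
--     too_many = any(a not in REQUIRED or provided.count(a) > 1 for a in provided)
--     missing = any(r not in provided for r in REQUIRED)
--     if not too_many and not missing:
--         return True
--     return 0 if too_many else 3
-- ===== Notes on version B (the rewrite author's own statement) =====
-- stated objective: idiomatic
-- what changed: Replaces A's stateful loop that consumes a mutable required-args list with .remove and an appended too_many list by a declarative one-shot check: collect the provided arg names once, then decide too_many via membership+count and missing via a membership scan over the fixed required list.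
import Mathlib
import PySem

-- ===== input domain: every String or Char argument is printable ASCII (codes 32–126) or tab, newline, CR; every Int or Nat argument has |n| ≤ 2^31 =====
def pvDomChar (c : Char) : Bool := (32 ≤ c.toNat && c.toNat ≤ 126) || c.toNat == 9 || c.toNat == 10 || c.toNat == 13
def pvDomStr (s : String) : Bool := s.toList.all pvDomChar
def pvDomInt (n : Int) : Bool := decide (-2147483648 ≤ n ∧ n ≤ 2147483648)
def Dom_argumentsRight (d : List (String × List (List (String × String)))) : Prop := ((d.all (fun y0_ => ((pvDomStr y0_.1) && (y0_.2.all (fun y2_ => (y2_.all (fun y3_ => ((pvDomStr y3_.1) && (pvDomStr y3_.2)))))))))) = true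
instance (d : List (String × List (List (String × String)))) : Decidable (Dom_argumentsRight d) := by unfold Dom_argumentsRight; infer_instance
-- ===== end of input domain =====

-- B replaces A's stateful consume-with-.remove loop by a declarative membership/count check (objective: idiomatic; same asymptotic cost).

-- ===== PORT A =====
-- A's local list literal `args`
def pvArgsA : List String := ["ApplicatorName","Energy","InsertName","IsAddCutoutChecked","IsocenterData","Name","Description","GantryAngle","CouchAngle","CollimatorAngle"]

-- `keyword.get("arg") in args` compares an Optional value with strings: None never matches, exactly as `v ∈ args.map some`.
def argumentsRight (d : List (String × List (List (String × String)))) : Int :=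
  let st := ((PySem.Dict.mk d).getD "keywords" []).foldl
    (fun (st : List String × List (Option String)) kw =>
      let v := (PySem.Dict.mk kw).get? "arg"
      if v ∈ st.1.map some then
        (match v with | some s => st.1.erase s | none => st.1, st.2)
      else (st.1, st.2 ++ [v]))
    (pvArgsA, [])
  if st.2 = [] ∧ st.1 = [] then 1 else if st.2 ≠ [] then 0 else 3

-- ===== PORT B =====
-- Source B's module-level constant REQUIRED
def pvRequired : List String := ["ApplicatorName","Energy","InsertName","IsAddCutoutChecked","IsocenterData","Name","Description","GantryAngle","CouchAngle","CollimatorAngle"]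

def argumentsRight_alt (d : List (String × List (List (String × String)))) : Int :=
  let provided := ((PySem.Dict.mk d).getD "keywords" []).map (fun kw => (PySem.Dict.mk kw).get? "arg")
  let tooMany := provided.any (fun a => !(pvRequired.map some).contains a || decide (1 < provided.count a))
  let missing := pvRequired.any (fun r => !provided.contains (some r))
  if !tooMany && !missing then 1 else if tooMany then 0 else 3

-- ===== PRECONDITION & SPEC =====
def Spec_argumentsRight (d : List (String × List (List (String × String)))) (out : Int) : Prop := out = argumentsRight_alt d
instance (d : List (String × List (List (String × String)))) (out : Int) : Decidable (Spec_argumentsRight d out) := by unfold Spec_argumentsRight; infer_instance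

-- ===== CLAIM (what is proved, stated in full; the proofs are below) =====
def Claim_equal_argumentsRight : Prop := ∀ (d : List (String × List (List (String × String)))), Dom_argumentsRight d → Spec_argumentsRight d (argumentsRight d)

-- ===== LEMMAS AND PROOFS =====

-- A's loop step, expressed on the already-extracted Optional arg value.
def pvStep (st : List String × List (Option String)) (v : Option String) : List String × List (Option String) :=
  if v ∈ st.1.map some then
    (match v with | some s => st.1.erase s | none => st.1, st.2)
  else (st.1, st.2 ++ [v])

theorem pvFold_eq (kws : List (List (String × String))) (st : List String × List (Option String)) :
    kws.foldl (fun st kw =>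
      let v := (PySem.Dict.mk kw).get? "arg"
      if v ∈ st.1.map some then
        (match v with | some s => st.1.erase s | none => st.1, st.2)
      else (st.1, st.2 ++ [v])) st
    = (kws.map (fun kw => (PySem.Dict.mk kw).get? "arg")).foldl pvStep st := by
  rw [List.foldl_map]
  rfl

theorem pvFold_fst (vs : List (Option String)) (args : List String) (tm : List (Option String))
    (h : args.Nodup) :
    (vs.foldl pvStep (args, tm)).1 = args.filter (fun r => !vs.contains (some r)) := by
  induction vs generalizing args tm with
  | nil => simp
  | cons v vs ih =>
    simp only [List.foldl_cons, pvStep]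
    by_cases hm : v ∈ args.map some
    · obtain ⟨s, hs, rfl⟩ := List.mem_map.1 hm
      simp only [if_pos hm]
      rw [ih _ _ (h.erase s), h.erase_eq_filter, List.filter_filter]
      apply List.filter_congr
      intro r hr
      simp only [List.contains_cons, Bool.not_or]
      rcases eq_or_ne r s with rfl | hne
      · simp
      · have hb : (r == s) = false := by simp [hne]
        simp [hb, bne, Bool.and_comm]
    · simp only [if_neg hm]
      rw [ih _ _ h]
      apply List.filter_congr
      intro r hr
      have hb : (some r == v) = false := by
        simp only [beq_eq_false_iff_ne, ne_eq]
        rintro rfl; exact hm (List.mem_map_of_mem hr)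
      simp only [List.contains_cons, hb, Bool.false_or]

theorem pvFold_snd (vs : List (Option String)) (args : List String) (tm : List (Option String))
    (h : args.Nodup) :
    (vs.foldl pvStep (args, tm)).2 = [] ↔ tm = [] ∧ ∀ v ∈ vs, v ∈ args.map some ∧ vs.count v = 1 := by
  induction vs generalizing args tm with
  | nil => simp
  | cons v vs ih =>
    simp only [List.foldl_cons, pvStep]
    by_cases hm : v ∈ args.map some
    · obtain ⟨s, hs, rfl⟩ := List.mem_map.1 hm
      simp only [if_pos hm]
      rw [ih _ _ (h.erase s)]
      constructor
      · rintro ⟨h1, h2⟩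
        refine ⟨h1, ?_⟩
        intro w hw
        rcases List.mem_cons.1 hw with rfl | hw'
        · refine ⟨hm, ?_⟩
          have hnot : some s ∉ vs := by
            intro hin
            have := (h2 _ hin).1
            obtain ⟨t, ht, hts⟩ := List.mem_map.1 this
            obtain rfl : t = s := Option.some_injective _ hts
            exact (h.not_mem_erase) ht
          simp [List.count_eq_zero.2 hnot]
        · have ⟨hmem, hcnt⟩ := h2 _ hw'
          obtain ⟨t, ht, rfl⟩ := List.mem_map.1 hmem
          have hts : t ≠ s := by
            rintro rfl; exact (h.not_mem_erase) ht
          refine ⟨List.mem_map_of_mem (List.erase_subset ht), ?_⟩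
          rw [List.count_cons_of_ne (by simpa using hts.symm), hcnt]
      · rintro ⟨h1, h2⟩
        refine ⟨h1, ?_⟩
        have hvnot : some s ∉ vs := by
          intro hin
          have := (h2 _ (List.mem_cons_self)).2
          rw [List.count_cons_self] at this
          have : vs.count (some s) = 0 := by omega
          exact (List.count_eq_zero.1 this) hin
        intro w hw
        have ⟨hmem, hcnt⟩ := h2 _ (List.mem_cons_of_mem _ hw)
        have hwv : w ≠ some s := by
          rintro rfl; exact hvnot hw
        obtain ⟨t, ht, rfl⟩ := List.mem_map.1 hmem
        have hts : t ≠ s := fun he => hwv (by rw [he])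
        refine ⟨List.mem_map_of_mem (List.mem_erase_of_ne hts |>.2 ht), ?_⟩
        rwa [List.count_cons_of_ne (by simpa using hwv.symm)] at hcnt
    · simp only [if_neg hm]
      rw [ih _ _ h]
      constructor
      · rintro ⟨h1, _⟩
        simp at h1
      · rintro ⟨_, h2⟩
        exact absurd (h2 v List.mem_cons_self).1 hm

-- ===== VERDICT (by name: the statement is the Claim_ definition above) =====
theorem argumentsRight_spec : Claim_equal_argumentsRight := by
  intro d _
  unfold Spec_argumentsRight argumentsRight argumentsRight_alt
  rw [pvFold_eq]
  set vals := ((PySem.Dict.mk d).getD "keywords" []).map (fun kw => (PySem.Dict.mk kw).get? "arg") with hvals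
  have hnd : pvArgsA.Nodup := by decide
  have h1 := pvFold_fst vals pvArgsA [] hnd
  have h2 := pvFold_snd vals pvArgsA [] hnd
  simp only [true_and] at h2
  have hreq : pvRequired = pvArgsA := rfl
  rw [hreq]
  -- B's tooMany flag is false exactly on A's "no overflow" condition
  have hB : (vals.any (fun a => !(pvArgsA.map some).contains a || decide (1 < vals.count a))) = false
      ↔ (∀ v ∈ vals, v ∈ pvArgsA.map some ∧ vals.count v = 1) := by
    rw [List.any_eq_false]
    constructor
    · intro hall v hv
      have := hall v hv
      have hge : 1 ≤ vals.count v := List.one_le_count_iff.2 hv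
      simp only [Bool.or_eq_true, Bool.not_eq_true', decide_eq_true_eq, not_or, not_lt] at this
      exact ⟨by simpa using this.1, by omega⟩
    · intro hall v hv
      have ⟨hm, hc⟩ := hall v hv
      simp [hm, hc]
  -- B's missing flag is false exactly on A's "args consumed" condition
  have hM : (pvArgsA.any (fun r => !vals.contains (some r))) = false
      ↔ (∀ r ∈ pvArgsA, some r ∈ vals) := by
    rw [List.any_eq_false]
    simp
  have hF : (pvArgsA.filter (fun r => !vals.contains (some r))) = []
      ↔ (∀ r ∈ pvArgsA, some r ∈ vals) := by
    rw [List.filter_eq_nil_iff]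
    simp
  by_cases hP : ∀ v ∈ vals, v ∈ pvArgsA.map some ∧ vals.count v = 1
  · have hBf := hB.2 hP
    have hsnd := h2.2 hP
    by_cases hQ : ∀ r ∈ pvArgsA, some r ∈ vals
    · have hMf := hM.2 hQ
      rw [if_pos ⟨hsnd, by rw [h1]; exact hF.2 hQ⟩, if_pos (show _ = true by rw [hBf, hMf]; rfl)]
    · have hMb : (pvArgsA.any fun r => !vals.contains (some r)) = true := by
        rcases Bool.eq_false_or_eq_true (pvArgsA.any fun r => !vals.contains (some r)) with ht | hf
        · exact ht
        · exact absurd (hM.1 hf) hQ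
      have hfst : (vals.foldl pvStep (pvArgsA, [])).1 ≠ [] := by
        rw [h1]; exact fun he => hQ (hF.1 he)
      rw [if_neg (fun hc => hfst hc.2), if_neg (fun hne => hne hsnd),
        if_neg (show ¬(_ = true) by rw [hBf, hMb]; simp), if_neg (show ¬(_ = true) by rw [hBf]; simp)]
  · have hsnd : (vals.foldl pvStep (pvArgsA, [])).2 ≠ [] := fun he => hP (h2.1 he)
    have hBb : (vals.any fun a => !(pvArgsA.map some).contains a || decide (1 < vals.count a)) = true := by
      rcases Bool.eq_false_or_eq_true (vals.any fun a => !(pvArgsA.map some).contains a || decide (1 < vals.count a)) with ht | hf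
      · exact ht
      · exact absurd (hB.1 hf) hP
    rw [if_neg (fun hc => hsnd hc.1), if_pos hsnd, if_neg (show ¬(_ = true) by rw [hBb]; simp), if_pos hBb]
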